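-- pv_equiv track=rewrite | github.com/winxlol/Python_Homeworks | 04_Functions/Exercise/10_List_Manipulator.py | last_even_odd
-- ===== SOURCE A (Python) =====
-- def last_even_odd(data, event, index, operation):
--     last_list_numbers = []
--     if index > len(data):
--         return "Invalid count"
--
--     count = 0
--
--     if operation == "even":
--         for number in reversed(data):
--             if number == 0:
--                 first_list_numbers = []
--                 return first_list_numbers
--             if number % 2 == 0:
--                 last_list_numbers.append(number)
--                 count += 1
--                 if count == index:
--                     return list(reversed(last_list_numbers))
--     elif operation == "odd":
--         for number in reversed(data):
--             if number == 0:
--                 first_list_numbers = []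
--                 return first_list_numbers
--             if number % 2 == 1:
--                 last_list_numbers.append(number)
--                 count += 1
--                 if count == index:
--                     return list(reversed(last_list_numbers))
--
--     return list(reversed(last_list_numbers))
-- ===== SOURCE B (Python) =====
-- def last_even_odd(data, event, index, operation):
--     if index > len(data):
--         return "Invalid count"
--     if operation == "even":
--         r = 0
--     elif operation == "odd":
--         r = 1
--     else:
--         return []
--     has_zero = 0 in data
--     suffix = data[len(data) - data[::-1].index(0):] if has_zero else data
--     matches = [n for n in suffix if n % 2 == r]
--     if 1 <= index <= len(matches):
--         return matches[-index:]
--     return [] if has_zero else matches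
-- ===== Notes on version B (the rewrite author's own statement) =====
-- stated objective: alternative
-- what changed: A does one reverse scan with a running counter and early returns; B decomposes the task declaratively: locate the last zero, filter the suffix after it by parity, and slice the last `index` matches (or return []/all matches per the zero/index case analysis).
-- outside the precondition, e.g. on last_even_odd([1, 2], 'e', 5, 'even'): A returns 'Invalid count', B returns 'Invalid count'
import Mathlib
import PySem

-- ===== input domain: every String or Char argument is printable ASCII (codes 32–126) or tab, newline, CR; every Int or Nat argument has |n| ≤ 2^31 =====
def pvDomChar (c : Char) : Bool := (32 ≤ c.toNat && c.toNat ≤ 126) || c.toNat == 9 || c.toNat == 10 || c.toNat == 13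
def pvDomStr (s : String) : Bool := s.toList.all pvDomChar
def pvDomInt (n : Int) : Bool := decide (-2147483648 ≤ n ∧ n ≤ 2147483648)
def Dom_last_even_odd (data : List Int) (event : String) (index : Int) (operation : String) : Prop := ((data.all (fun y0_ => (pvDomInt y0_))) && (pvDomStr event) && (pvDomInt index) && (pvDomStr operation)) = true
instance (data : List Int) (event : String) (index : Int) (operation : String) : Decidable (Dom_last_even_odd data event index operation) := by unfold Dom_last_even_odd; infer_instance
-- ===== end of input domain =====

-- B replaces A's reverse scan with counter by a declarative decomposition (suffix after the
-- last zero, parity filter, slice); not faster; equivalence is about the return value.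

-- ===== PORT A =====
-- the for-loop over reversed(data): acc = last_list_numbers, count as in A
def lastA_loop (r index : Int) : List Int → List Int → Int → List Int
  | [], acc, _ => acc.reverse
  | n :: rest, acc, count =>
    if n = 0 then []
    else if PySem.Int.mod n 2 = r then
      if count + 1 = index then (acc ++ [n]).reverse
      else lastA_loop r index rest (acc ++ [n]) (count + 1)
    else lastA_loop r index rest acc count

def last_even_odd (data : List Int) (event : String) (index : Int) (operation : String) : List Int :=
  if index > (data.length : Int) then []   -- Python A returns the string "Invalid count" here; excluded by Pre_
  else if operation == "even" then lastA_loop 0 index data.reverse [] 0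
  else if operation == "odd" then lastA_loop 1 index data.reverse [] 0
  else []

-- ===== PORT B =====
-- body of Source B once a parity r is selected
def lastB_core (r : Int) (data : List Int) (index : Int) : List Int :=
  let hasZero := data.contains 0
  let suffix :=
    if hasZero then
      PySem.List.slice data (some ((data.length : Int) - (((PySem.List.index? data.reverse 0).getD 0 : Nat) : Int))) none
    else data
  let matched := suffix.filter (fun n => PySem.Int.mod n 2 == r)
  if 1 ≤ index ∧ index ≤ (matched.length : Int) then
    PySem.List.slice matched (some (-index)) none
  else if hasZero then [] else matched

def last_even_odd_alt (data : List Int) (event : String) (index : Int) (operation : String) : List Int :=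
  if index > (data.length : Int) then []   -- Source B returns the string "Invalid count" here; excluded by Pre_
  else if operation == "even" then lastB_core 0 data index
  else if operation == "odd" then lastB_core 1 data index
  else []

-- ===== PRECONDITION & SPEC =====
-- Pre_ excludes index > len(data), where the Python programs return the string "Invalid count" — not a list[int].
def Pre_last_even_odd (data : List Int) (event : String) (index : Int) (operation : String) : Prop :=
  index ≤ (data.length : Int)
instance (data : List Int) (event : String) (index : Int) (operation : String) : Decidable (Pre_last_even_odd data event index operation) := by unfold Pre_last_even_odd; infer_instance
def pvWitness_last_even_odd : List Int × String × Int × String := ([2, 0, 4, 6, 3], "e", 2, "even")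

def Spec_last_even_odd (data : List Int) (event : String) (index : Int) (operation : String) (out : List Int) : Prop := out = last_even_odd_alt data event index operation
instance (data : List Int) (event : String) (index : Int) (operation : String) (out : List Int) : Decidable (Spec_last_even_odd data event index operation out) := by unfold Spec_last_even_odd; infer_instance

-- ===== CLAIM (what is proved, stated in full; the proofs are below) =====
def Claim_equal_last_even_odd : Prop := ∀ (data : List Int) (event : String) (index : Int) (operation : String), Dom_last_even_odd data event index operation → Pre_last_even_odd data event index operation → Spec_last_even_odd data event index operation (last_even_odd data event index operation)

-- ===== LEMMAS AND PROOFS =====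

-- the parity matches A's scan can still collect from l before hitting a zero
def availOf (r : Int) (l : List Int) : List Int :=
  (l.takeWhile (fun n => n != 0)).filter (fun n => PySem.Int.mod n 2 == r)

theorem availOf_cons_zero (r : Int) (rest : List Int) : availOf r (0 :: rest) = [] := by
  simp [availOf]

theorem availOf_cons_match (r n : Int) (rest : List Int) (hz : n ≠ 0)
    (hp : PySem.Int.mod n 2 = r) : availOf r (n :: rest) = n :: availOf r rest := by
  rw [availOf, availOf, List.takeWhile_cons, if_pos (by simpa using hz), List.filter_cons,
    if_pos (by simpa using hp)]

theorem availOf_cons_skip (r n : Int) (rest : List Int) (hz : n ≠ 0)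
    (hp : ¬ PySem.Int.mod n 2 = r) : availOf r (n :: rest) = availOf r rest := by
  rw [availOf, availOf, List.takeWhile_cons, if_pos (by simpa using hz), List.filter_cons,
    if_neg (by simpa using hp)]

-- characterization of A's loop (count is kept equal to acc.length)
theorem lastA_loop_char (r index : Int) (l : List Int) : ∀ acc : List Int,
    lastA_loop r index l acc (acc.length : Int) =
      if (acc.length : Int) < index ∧ index ≤ (acc.length : Int) + ((availOf r l).length : Int) then
        (acc ++ (availOf r l).take (index - (acc.length : Int)).toNat).reverse
      else if l.contains 0 then [] else (acc ++ availOf r l).reverse := by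
  induction l with
  | nil =>
    intro acc
    simp only [lastA_loop, availOf, List.takeWhile_nil, List.filter_nil, List.length_nil,
      List.contains_nil, List.append_nil]
    rw [if_neg (by push_cast; omega)]
    simp
  | cons n rest ih =>
    intro acc
    by_cases hz : n = 0
    · subst hz
      have hL : lastA_loop r index (0 :: rest) acc ((acc.length : Nat) : Int) = [] := by
        simp [lastA_loop]
      rw [hL, availOf_cons_zero]
      have hnc : ¬ ((acc.length : Int) < index ∧
          index ≤ (acc.length : Int) + ((([] : List Int).length : Nat) : Int)) := by
        simp only [List.length_nil, Nat.cast_zero, add_zero]; omega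
      rw [if_neg hnc, if_pos (by simp : (0 :: rest).contains 0 = true)]
    · have hcont : (n :: rest).contains 0 = rest.contains 0 := by
        simp [Ne.symm hz]
      simp only [lastA_loop, if_neg hz]
      by_cases hp : PySem.Int.mod n 2 = r
      · rw [if_pos hp, availOf_cons_match r n rest hz hp]
        by_cases heq : (acc.length : Int) + 1 = index
        · rw [if_pos heq]
          have hcond : ((acc.length : Int) < index ∧
              index ≤ (acc.length : Int) + ((n :: availOf r rest).length : Int)) := by
            simp only [List.length_cons]; push_cast; omega
          rw [if_pos hcond]
          have h1 : (index - (acc.length : Int)).toNat = 1 := by omega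
          rw [h1]
          simp
        · rw [if_neg heq]
          have hlen : ((acc ++ [n]).length : Int) = (acc.length : Int) + 1 := by
            push_cast; simp
          have h2 := ih (acc ++ [n])
          rw [hlen] at h2
          rw [h2, hcont]
          by_cases hc : ((acc.length : Int) + 1 < index ∧
              index ≤ (acc.length : Int) + 1 + ((availOf r rest).length : Int))
          · rw [if_pos hc]
            have hc' : ((acc.length : Int) < index ∧
                index ≤ (acc.length : Int) + ((n :: availOf r rest).length : Int)) := by
              simp only [List.length_cons]; push_cast; omega
            rw [if_pos hc']
            have hk : (index - (acc.length : Int)).toNat =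
                (index - ((acc.length : Int) + 1)).toNat + 1 := by omega
            rw [hk]
            simp [List.take_succ_cons]
          · rw [if_neg hc]
            have hc' : ¬ ((acc.length : Int) < index ∧
                index ≤ (acc.length : Int) + ((n :: availOf r rest).length : Int)) := by
              simp only [List.length_cons]; push_cast; omega
            rw [if_neg hc']
            split_ifs <;> simp
      · rw [if_neg hp, availOf_cons_skip r n rest hz hp, ih acc, hcont]

-- takeWhile (≠ 0) is take up to the first zero
theorem takeWhile_ne_zero_eq_take (l : List Int) :
    l.takeWhile (fun n => n != 0) = l.take (l.idxOf 0) := by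
  induction l with
  | nil => simp
  | cons n rest ih =>
    by_cases hz : n = 0
    · subst hz; simp [List.idxOf_cons]
    · simp [List.takeWhile_cons, hz, List.idxOf_cons, ih]

theorem idxOf?_of_mem (l : List Int) (v : Int) (h : v ∈ l) :
    l.idxOf? v = some (l.idxOf v) := by
  induction l with
  | nil => simp at h
  | cons a t ih =>
    by_cases hv : a = v
    · subst hv; simp [List.idxOf?_cons]
    · rcases List.mem_cons.mp h with h1 | h2
      · exact absurd h1.symm hv
      · simp [List.idxOf?_cons, hv, ih h2]

-- the suffix B computes is the reverse of what A's scan sees before stopping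
theorem suffix_eq (data : List Int) :
    data.drop (data.length - data.reverse.idxOf 0) =
      (data.reverse.take (data.reverse.idxOf 0)).reverse := by
  rw [List.reverse_take]
  simp

-- main bridge: A's loop from the initial state equals B's core
theorem loop_eq_core (r index : Int) (data : List Int) :
    lastA_loop r index data.reverse [] 0 = lastB_core r data index := by
  have h := lastA_loop_char r index data.reverse []
  simp only [List.length_nil, Nat.cast_zero, List.nil_append, zero_add] at h
  rw [h]
  unfold lastB_core
  by_cases h0 : data.contains 0 = true
  · -- a zero occurs: B's suffix is the part after the last zero
    have hmemr : (0 : Int) ∈ data.reverse := by simpa using h0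
    have hidx : PySem.List.index? data.reverse 0 = some (data.reverse.idxOf 0) := by
      rw [PySem.List.index?_eq_idxOf?]
      exact idxOf?_of_mem _ _ hmemr
    have hi_le : data.reverse.idxOf 0 ≤ data.length := by
      have := List.idxOf_lt_length_of_mem hmemr
      simp at this; omega
    have hmatch : (PySem.List.slice data
        (some ((data.length : Int) - (((PySem.List.index? data.reverse 0).getD 0 : Nat) : Int))) none).filter
        (fun n => PySem.Int.mod n 2 == r) = (availOf r data.reverse).reverse := by
      rw [hidx]
      simp only [Option.getD_some]
      rw [PySem.List.slice_from _ (by omega)]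
      have ht : ((data.length : Int) - ((data.reverse.idxOf 0 : Nat) : Int)).toNat =
          data.length - data.reverse.idxOf 0 := by omega
      rw [ht, suffix_eq data, List.filter_reverse, availOf, takeWhile_ne_zero_eq_take]
    have hcontr : data.reverse.contains 0 = true := by simpa using h0
    simp only [h0, if_true, hmatch, List.length_reverse]
    by_cases hc : (0 : Int) < index ∧ index ≤ ((availOf r data.reverse).length : Int)
    · rw [if_pos hc, if_pos (by omega : (1 : Int) ≤ index ∧ index ≤ ((availOf r data.reverse).length : Int))]
      have hkpos : 0 < index.toNat := by omega
      have hneg : -index = -((index.toNat : Nat) : Int) := by omega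
      rw [hneg, PySem.List.slice_from_neg_natCast _ _ hkpos, List.length_reverse,
        List.reverse_take]
      congr 1
      have hkle : index.toNat ≤ (availOf r data.reverse).length := by omega
      omega
    · rw [if_neg hc, if_neg (by omega : ¬ ((1 : Int) ≤ index ∧ index ≤ ((availOf r data.reverse).length : Int))),
        if_pos hcontr]
  · -- no zero in data
    have h0' : data.contains 0 = false := by simpa using h0
    have hnomem : (0 : Int) ∉ data.reverse := by
      simp only [List.mem_reverse]
      simpa using h0'
    have htw : data.reverse.takeWhile (fun n => n != 0) = data.reverse := by
      apply List.takeWhile_eq_self_iff.mpr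
      intro x hx
      simp only [bne_iff_ne, ne_eq]
      intro hx0; subst hx0; exact hnomem hx
    have hcontr : data.reverse.contains 0 = false := by simpa using hnomem
    have hmatch : data.filter (fun n => PySem.Int.mod n 2 == r) =
        (availOf r data.reverse).reverse := by
      rw [availOf, htw, List.filter_reverse, List.reverse_reverse]
    simp only [h0', Bool.false_eq_true, if_false, hmatch, List.length_reverse]
    by_cases hc : (0 : Int) < index ∧ index ≤ ((availOf r data.reverse).length : Int)
    · rw [if_pos hc, if_pos (by omega : (1 : Int) ≤ index ∧ index ≤ ((availOf r data.reverse).length : Int))]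
      have hkpos : 0 < index.toNat := by omega
      have hneg : -index = -((index.toNat : Nat) : Int) := by omega
      rw [hneg, PySem.List.slice_from_neg_natCast _ _ hkpos, List.length_reverse,
        List.reverse_take]
      congr 1
      have hkle : index.toNat ≤ (availOf r data.reverse).length := by omega
      omega
    · rw [if_neg hc, if_neg (by omega : ¬ ((1 : Int) ≤ index ∧ index ≤ ((availOf r data.reverse).length : Int))),
        hcontr]
      simp

-- ===== VERDICT (by name: the statement is the Claim_ definition above) =====
theorem last_even_odd_spec : Claim_equal_last_even_odd := by
  intro data event index operation _ hpre
  unfold Spec_last_even_odd last_even_odd last_even_odd_alt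
  have hg : ¬ index > (data.length : Int) := not_lt.mpr hpre
  rw [if_neg hg, if_neg hg]
  by_cases he : operation == "even"
  · rw [if_pos he, if_pos he, loop_eq_core]
  · rw [if_neg he, if_neg he]
    by_cases ho : operation == "odd"
    · rw [if_pos ho, if_pos ho, loop_eq_core]
    · rw [if_neg ho, if_neg ho]
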